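-- pv_equiv track=rewrite | github.com/heliosssssssssss/helios-lc-25-27 | aipo/aipo-main/aipo-2025-prelim/closenumbers.py | close_num
-- ===== SOURCE A (Python) =====
-- def close_num(n):
--     n_str = str(n)
--     num_digits = len(n_str)
--     close_numbers = 0
--
--     for i in range(num_digits):
--         current_digit = int(n_str[i])
--
--         for x in [-1, 1]:
--             new_digit = current_digit + x
--             if 0 <= new_digit <= 9:
--                 new_number = n_str[:i] + str(new_digit) + n_str[i+1:]
--
--                 if len(new_number) == num_digits and not (new_number[0] == '0' and len(new_number) > 1):
--                     close_numbers +=1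
--
--
--     return close_numbers
-- ===== SOURCE B (Python) =====
-- def close_num(n):
--     s = str(n)
--     many = len(s) > 1
--     total = 0
--     for i, ch in enumerate(s):
--         d = int(ch)
--         c = 2 - (d == 0) - (d == 9)
--         if i == 0 and many and d == 1:
--             c -= 1
--         total += c
--     return total
-- ===== Notes on version B (the rewrite author's own statement) =====
-- stated objective: simpler
-- what changed: B replaces A's per-candidate string slicing/reconstruction and length/leading-zero tests with a closed-form per-digit count (two minus corrections for the boundary digits and for the excluded leading-zero candidate), accumulated in one pass over the digits.
import Mathlib
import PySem

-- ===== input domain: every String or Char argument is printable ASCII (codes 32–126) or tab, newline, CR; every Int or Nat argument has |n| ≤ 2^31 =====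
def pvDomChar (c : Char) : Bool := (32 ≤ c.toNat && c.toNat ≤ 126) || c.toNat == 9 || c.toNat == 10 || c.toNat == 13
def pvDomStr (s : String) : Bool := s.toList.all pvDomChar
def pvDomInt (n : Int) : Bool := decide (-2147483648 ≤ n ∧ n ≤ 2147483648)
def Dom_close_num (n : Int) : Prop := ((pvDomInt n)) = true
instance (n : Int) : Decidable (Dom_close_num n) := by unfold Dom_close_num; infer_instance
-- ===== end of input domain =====

-- B replaces A's per-candidate string slicing/reconstruction and length/leading-zero tests by a
-- closed-form per-digit count accumulated in one pass (objective: simpler).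

-- ===== PORT A =====
def close_num (n : Int) : Int :=
  let nStr := PySem.Int.toChars n
  let numDigits := PySem.List.len nStr
  (PySem.List.pyRange 0 numDigits 1).foldl (fun closeNumbers i =>
    -- current_digit = int(n_str[i]); in range, so the Option is some (ValueError only for '-', excluded by Pre_)
    let currentDigit := (PySem.Int.ofChars? [PySem.List.pyGetD nStr i ' ']).getD 0
    [(-1 : Int), 1].foldl (fun acc x =>
      let newDigit := currentDigit + x
      if 0 ≤ newDigit ∧ newDigit ≤ 9 then
        let newNumber := PySem.List.slice nStr none (some i) ++ PySem.Int.toChars newDigit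
          ++ PySem.List.slice nStr (some (i + 1)) none
        if PySem.List.len newNumber = numDigits ∧
            ¬ (PySem.List.pyGetD newNumber 0 ' ' = '0' ∧ 1 < PySem.List.len newNumber)
        then acc + 1 else acc
      else acc) closeNumbers) 0

-- ===== PORT B =====
def close_num_alt (n : Int) : Int :=
  let s := PySem.Int.toChars n
  (PySem.List.enumerate s).foldl (fun total p =>
    -- d = int(ch)  (ValueError only for '-', excluded by Pre_)
    let d := (PySem.Int.ofChars? [p.2]).getD 0
    let c : Int := 2 - (if d = 0 then 1 else 0) - (if d = 9 then 1 else 0)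
    let c := if p.1 = 0 ∧ 1 < PySem.List.len s ∧ d = 1 then c - 1 else c
    total + c) 0

-- ===== PRECONDITION & SPEC =====
-- For n < 0, str(n) starts with '-' and int('-') raises ValueError in both A and B.
def Pre_close_num (n : Int) : Prop := 0 ≤ n
instance (n : Int) : Decidable (Pre_close_num n) := by unfold Pre_close_num; infer_instance
def pvWitness_close_num : Int := 12

def Spec_close_num (n : Int) (out : Int) : Prop := out = close_num_alt n
instance (n : Int) (out : Int) : Decidable (Spec_close_num n out) := by unfold Spec_close_num; infer_instance

-- ===== CLAIM (what is proved, stated in full; the proofs are below) =====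
def Claim_equal_close_num : Prop := ∀ (n : Int), Dom_close_num n → Pre_close_num n → Spec_close_num n (close_num n)

-- ===== LEMMAS AND PROOFS =====

-- Shape of Nat.toDigitsCore: digit characters, nonempty, leading zero only for 0 itself.
lemma toDigitsCore_shape : ∀ (f n : Nat) (ds : List Char), n < f →
    ∃ l, Nat.toDigitsCore 10 f n ds = l ++ ds ∧ l ≠ [] ∧
      (∀ c ∈ l, 48 ≤ c.toNat ∧ c.toNat ≤ 57) ∧
      (l.head? = some '0' → n = 0) ∧ (n = 0 → l = ['0']) := by
  intro f
  induction f with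
  | zero => intro n ds h; omega
  | succ f ih =>
    intro n ds h
    rw [Nat.toDigitsCore]
    by_cases hq : n / 10 = 0
    · have hn10 : n < 10 := Nat.lt_of_div_eq_zero (by norm_num) hq
      have hmod : n % 10 = n := Nat.mod_eq_of_lt hn10
      refine ⟨[Nat.digitChar (n % 10)], by simp [hq], by simp, ?_, ?_, ?_⟩
      · intro c hc
        simp only [List.mem_singleton] at hc
        subst hc
        rw [hmod]; interval_cases n <;> decide
      · intro hh
        simp only [List.head?_cons, Option.some.injEq] at hh
        rw [hmod] at hh
        interval_cases n <;> simp_all <;> exact absurd hh (by decide)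
      · intro h0; subst h0; rfl
    · have hpos : 0 < n := by
        rcases Nat.eq_zero_or_pos n with h0 | h0
        · exact absurd (by simp [h0]) hq
        · exact h0
      have hlt : n / 10 < f := lt_of_lt_of_le (Nat.div_lt_self hpos (by norm_num)) (by omega)
      obtain ⟨l', heq, hne, hdig, hhead, hzero⟩ := ih (n / 10) (Nat.digitChar (n % 10) :: ds) hlt
      simp only [hq, if_false]
      refine ⟨l' ++ [Nat.digitChar (n % 10)], by simp [heq], by simp [hne], ?_, ?_, ?_⟩
      · intro c hc
        rcases List.mem_append.mp hc with hc | hc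
        · exact hdig c hc
        · simp only [List.mem_singleton] at hc
          subst hc
          have : n % 10 < 10 := Nat.mod_lt _ (by norm_num)
          set m := n % 10 with hm
          interval_cases m <;> decide
      · intro hh
        obtain ⟨a, t, rfl⟩ := List.exists_cons_of_ne_nil hne
        simp only [List.cons_append, List.head?_cons] at hh
        exact absurd (hhead (by simp [hh])) hq
      · intro h0; omega

lemma toChars_facts (n : Int) (hn : 0 ≤ n) :
    PySem.Int.toChars n ≠ [] ∧
    (∀ c ∈ PySem.Int.toChars n, 48 ≤ c.toNat ∧ c.toNat ≤ 57) ∧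
    ((PySem.Int.toChars n).head? = some '0' → PySem.Int.toChars n = ['0']) := by
  obtain ⟨l, heq, hne, hdig, hhead, hzero⟩ :=
    toDigitsCore_shape (n.toNat + 1) n.toNat [] (Nat.lt_succ_self _)
  have hchars : PySem.Int.toChars n = l := by
    simp only [PySem.Int.toChars, if_neg (not_lt.mpr hn), Nat.toDigits]
    simpa using heq
  refine ⟨by simp [hchars, hne], by simp [hchars]; exact hdig, ?_⟩
  intro hh
  rw [hchars] at hh ⊢
  exact hzero (hhead hh)

lemma digit_char_cases (c : Char) (h1 : 48 ≤ c.toNat) (h2 : c.toNat ≤ 57) :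
    c = '0' ∨ c = '1' ∨ c = '2' ∨ c = '3' ∨ c = '4' ∨ c = '5' ∨ c = '6' ∨ c = '7' ∨
    c = '8' ∨ c = '9' := by
  have hco : ∀ (m : Nat), c.toNat = m → c = Char.ofNat m := by
    intro m hm
    have h2 := Char.ofNat_toNat c
    rw [hm] at h2
    exact h2.symm
  have : c.toNat = 48 ∨ c.toNat = 49 ∨ c.toNat = 50 ∨ c.toNat = 51 ∨ c.toNat = 52 ∨
      c.toNat = 53 ∨ c.toNat = 54 ∨ c.toNat = 55 ∨ c.toNat = 56 ∨ c.toNat = 57 := by omega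
  rcases this with h | h | h | h | h | h | h | h | h | h <;> rw [hco _ h] <;> decide

-- length of s[:k] ++ [a] ++ s[k+1:] equals length of s
lemma len_patch (s : List Char) (k : Nat) (hk : k < s.length) (a : Char) :
    (List.take k s ++ [a] ++ List.drop (k + 1) s).length = s.length := by
  simp [List.length_take, List.length_drop]
  omega

-- head of the patched string
lemma head_patch (s : List Char) (k : Nat) (hk : k < s.length) (a : Char) :
    PySem.List.pyGetD (List.take k s ++ [a] ++ List.drop (k + 1) s) 0 ' ' =
      if k = 0 then a else PySem.List.pyGetD s 0 ' ' := by
  by_cases h0 : k = 0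
  · subst h0; simp [PySem.List.pyGetD_zero]
  · have hpos : 0 < k := Nat.pos_of_ne_zero h0
    obtain ⟨b, t, hs⟩ := List.exists_cons_of_ne_nil (List.ne_nil_of_length_pos (by omega) : s ≠ [])
    subst hs
    rw [if_neg h0]
    obtain ⟨k', rfl⟩ : ∃ k', k = k' + 1 := ⟨k - 1, by omega⟩
    simp [PySem.List.pyGetD_zero]

-- the leading-zero test on the patched string
lemma cond_patch (s : List Char) (hne : s ≠ [])
    (hhead : s.head? = some '0' → s = ['0']) (k : Nat) (hk : k < s.length) (a : Char) :
    ((PySem.List.pyGetD (List.take k s ++ [a] ++ List.drop (k + 1) s) 0 ' ' = '0' ∧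
        1 < PySem.List.len (List.take k s ++ [a] ++ List.drop (k + 1) s)) ↔
      (k = 0 ∧ a = '0' ∧ 1 < s.length)) := by
  rw [head_patch s k hk a]
  simp only [PySem.List.len_eq, len_patch s k hk a]
  constructor
  · rintro ⟨hh, hl⟩
    by_cases h0 : k = 0
    · exact ⟨h0, by rwa [if_pos h0] at hh, by exact_mod_cast hl⟩
    · exfalso
      rw [if_neg h0] at hh
      obtain ⟨b, t, hs⟩ := List.exists_cons_of_ne_nil hne
      rw [hs] at hh
      simp [PySem.List.pyGetD_zero] at hh
      have : s = ['0'] := hhead (by rw [hs, hh]; rfl)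
      rw [this] at hk
      simp at hk
      omega
  · rintro ⟨h0, ha, hl⟩
    exact ⟨by rw [if_pos h0, ha], by exact_mod_cast hl⟩

-- one x-branch of A's inner loop, as a closed-form count
lemma branch_eq (s : List Char) (hne : s ≠ [])
    (hhead : s.head? = some '0' → s = ['0']) (k : Nat) (hk : k < s.length)
    (acc : Int) (nd : Int) (a : Char) (hta : PySem.Int.toChars nd = [a]) :
    (if PySem.List.len (PySem.List.slice s none (some (k : Int)) ++ PySem.Int.toChars nd
          ++ PySem.List.slice s (some ((k : Int) + 1)) none) = PySem.List.len s ∧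
        ¬ (PySem.List.pyGetD (PySem.List.slice s none (some (k : Int)) ++ PySem.Int.toChars nd
            ++ PySem.List.slice s (some ((k : Int) + 1)) none) 0 ' ' = '0' ∧
          1 < PySem.List.len (PySem.List.slice s none (some (k : Int)) ++ PySem.Int.toChars nd
            ++ PySem.List.slice s (some ((k : Int) + 1)) none))
      then acc + 1 else acc) =
    if k = 0 ∧ a = '0' ∧ 1 < s.length then acc else acc + 1 := by
  have hsl1 : PySem.List.slice s none (some (k : Int)) = List.take k s := by
    rw [PySem.List.slice_to s (by positivity)]; simp
  have hsl2 : PySem.List.slice s (some ((k : Int) + 1)) none = List.drop (k + 1) s := by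
    rw [PySem.List.slice_from s (by positivity)]
    norm_num
  rw [hsl1, hsl2, hta]
  have hcond := cond_patch s hne hhead k hk a
  have hlen := len_patch s k hk a
  have hlen' : PySem.List.len (List.take k s ++ [a] ++ List.drop (k + 1) s) =
      PySem.List.len s := by
    simp only [PySem.List.len_eq, hlen]
  have key : (PySem.List.len (List.take k s ++ [a] ++ List.drop (k + 1) s) = PySem.List.len s ∧
      ¬ (PySem.List.pyGetD (List.take k s ++ [a] ++ List.drop (k + 1) s) 0 ' ' = '0' ∧
        1 < PySem.List.len (List.take k s ++ [a] ++ List.drop (k + 1) s))) ↔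
      ¬ (k = 0 ∧ a = '0' ∧ 1 < s.length) := by
    constructor
    · rintro ⟨_, hnh⟩ hP
      exact hnh (hcond.mpr hP)
    · intro hP
      exact ⟨hlen', fun hh => hP (hcond.mp hh)⟩
  by_cases hP : k = 0 ∧ a = '0' ∧ 1 < s.length
  · rw [if_neg (fun hC => (key.mp hC) hP), if_pos hP]
  · rw [if_pos (key.mpr hP), if_neg hP]

-- counting branch: the inserted digit is not '0', so it always counts
lemma branch_eq' (s : List Char) (hne : s ≠ [])
    (hhead : s.head? = some '0' → s = ['0']) (k : Nat) (hk : k < s.length)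
    (acc : Int) (nd : Int) (a : Char) (hta : PySem.Int.toChars nd = [a]) (ha : a ≠ '0') :
    (if PySem.List.len (PySem.List.slice s none (some (k : Int)) ++ PySem.Int.toChars nd
          ++ PySem.List.slice s (some ((k : Int) + 1)) none) = PySem.List.len s ∧
        ¬ (PySem.List.pyGetD (PySem.List.slice s none (some (k : Int)) ++ PySem.Int.toChars nd
            ++ PySem.List.slice s (some ((k : Int) + 1)) none) 0 ' ' = '0' ∧
          1 < PySem.List.len (PySem.List.slice s none (some (k : Int)) ++ PySem.Int.toChars nd
            ++ PySem.List.slice s (some ((k : Int) + 1)) none))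
      then acc + 1 else acc) = acc + 1 := by
  rw [branch_eq s hne hhead k hk acc nd a hta,
      if_neg (fun h => ha h.2.1)]

-- per-index equality of the two loop bodies, then the whole loops
lemma loops_eq (s : List Char) (hne : s ≠ [])
    (hdig : ∀ c ∈ s, 48 ≤ c.toNat ∧ c.toNat ≤ 57)
    (hhead : s.head? = some '0' → s = ['0']) :
    (PySem.List.pyRange 0 (PySem.List.len s) 1).foldl (fun closeNumbers i =>
      let currentDigit := (PySem.Int.ofChars? [PySem.List.pyGetD s i ' ']).getD 0
      [(-1 : Int), 1].foldl (fun acc x =>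
        let newDigit := currentDigit + x
        if 0 ≤ newDigit ∧ newDigit ≤ 9 then
          let newNumber := PySem.List.slice s none (some i) ++ PySem.Int.toChars newDigit
            ++ PySem.List.slice s (some (i + 1)) none
          if PySem.List.len newNumber = PySem.List.len s ∧
              ¬ (PySem.List.pyGetD newNumber 0 ' ' = '0' ∧ 1 < PySem.List.len newNumber)
          then acc + 1 else acc
        else acc) closeNumbers) 0 =
    (PySem.List.enumerate s).foldl (fun total p =>
      let d := (PySem.Int.ofChars? [p.2]).getD 0
      let c : Int := 2 - (if d = 0 then 1 else 0) - (if d = 9 then 1 else 0)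
      let c := if p.1 = 0 ∧ 1 < PySem.List.len s ∧ d = 1 then c - 1 else c
      total + c) 0 := by
  rw [PySem.List.enumerate_eq_map_pyRange s ' ', List.foldl_map]
  apply PySem.List.foldl_congr_mem
  intro acc i hmem
  rw [PySem.List.mem_pyRange_one] at hmem
  obtain ⟨h0, hiL⟩ := hmem
  obtain ⟨k, rfl⟩ : ∃ k : Nat, i = (k : Int) := ⟨i.toNat, (Int.toNat_of_nonneg h0).symm⟩
  have hk : k < s.length := by
    rw [PySem.List.len_eq] at hiL; exact_mod_cast hiL
  have hget : PySem.List.pyGetD s (k : Int) ' ' = s[k] := by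
    rw [PySem.List.pyGetD_natCast, List.getD_eq_getElem?_getD, List.getElem?_eq_getElem hk]
    rfl
  have hdigk := hdig s[k] (List.getElem_mem hk)
  rcases digit_char_cases s[k] hdigk.1 hdigk.2 with hc | hc | hc | hc | hc | hc | hc | hc | hc | hc
  · simp only [List.foldl_cons, List.foldl_nil, hget, hc,
      show (PySem.Int.ofChars? ['0']).getD 0 = 0 from by decide]
    rw [if_neg (show ¬((0:Int) ≤ 0 + -1 ∧ (0:Int) + -1 ≤ 9) from by norm_num),
        if_pos (show (0:Int) ≤ 0 + 1 ∧ (0:Int) + 1 ≤ 9 from by norm_num),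
        branch_eq' s hne hhead k hk acc (0 + 1) '1' (by decide) (by decide)]
    norm_num
  · simp only [List.foldl_cons, List.foldl_nil, hget, hc,
      show (PySem.Int.ofChars? ['1']).getD 0 = 1 from by decide]
    rw [if_pos (show (0:Int) ≤ 1 + -1 ∧ (1:Int) + -1 ≤ 9 from by norm_num),
        if_pos (show (0:Int) ≤ 1 + 1 ∧ (1:Int) + 1 ≤ 9 from by norm_num),
        branch_eq s hne hhead k hk acc (1 + -1) '0' (by decide),
        branch_eq' s hne hhead k hk _ (1 + 1) '2' (by decide) (by decide),
        if_neg (show ¬((1:Int) = 0) from by norm_num),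
        if_neg (show ¬((1:Int) = 9) from by norm_num)]
    simp only [PySem.List.len_eq, Nat.cast_eq_zero, Nat.one_lt_cast,
      true_and, and_true]
    split_ifs <;> omega
  · simp only [List.foldl_cons, List.foldl_nil, hget, hc,
      show (PySem.Int.ofChars? ['2']).getD 0 = 2 from by decide]
    rw [if_pos (show (0:Int) ≤ 2 + -1 ∧ (2:Int) + -1 ≤ 9 from by norm_num),
        if_pos (show (0:Int) ≤ 2 + 1 ∧ (2:Int) + 1 ≤ 9 from by norm_num),
        branch_eq' s hne hhead k hk acc (2 + -1) '1' (by decide) (by decide),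
        branch_eq' s hne hhead k hk _ (2 + 1) '3' (by decide) (by decide)]
    norm_num
    omega
  · simp only [List.foldl_cons, List.foldl_nil, hget, hc,
      show (PySem.Int.ofChars? ['3']).getD 0 = 3 from by decide]
    rw [if_pos (show (0:Int) ≤ 3 + -1 ∧ (3:Int) + -1 ≤ 9 from by norm_num),
        if_pos (show (0:Int) ≤ 3 + 1 ∧ (3:Int) + 1 ≤ 9 from by norm_num),
        branch_eq' s hne hhead k hk acc (3 + -1) '2' (by decide) (by decide),
        branch_eq' s hne hhead k hk _ (3 + 1) '4' (by decide) (by decide)]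
    norm_num
    omega
  · simp only [List.foldl_cons, List.foldl_nil, hget, hc,
      show (PySem.Int.ofChars? ['4']).getD 0 = 4 from by decide]
    rw [if_pos (show (0:Int) ≤ 4 + -1 ∧ (4:Int) + -1 ≤ 9 from by norm_num),
        if_pos (show (0:Int) ≤ 4 + 1 ∧ (4:Int) + 1 ≤ 9 from by norm_num),
        branch_eq' s hne hhead k hk acc (4 + -1) '3' (by decide) (by decide),
        branch_eq' s hne hhead k hk _ (4 + 1) '5' (by decide) (by decide)]
    norm_num
    omega
  · simp only [List.foldl_cons, List.foldl_nil, hget, hc,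
      show (PySem.Int.ofChars? ['5']).getD 0 = 5 from by decide]
    rw [if_pos (show (0:Int) ≤ 5 + -1 ∧ (5:Int) + -1 ≤ 9 from by norm_num),
        if_pos (show (0:Int) ≤ 5 + 1 ∧ (5:Int) + 1 ≤ 9 from by norm_num),
        branch_eq' s hne hhead k hk acc (5 + -1) '4' (by decide) (by decide),
        branch_eq' s hne hhead k hk _ (5 + 1) '6' (by decide) (by decide)]
    norm_num
    omega
  · simp only [List.foldl_cons, List.foldl_nil, hget, hc,
      show (PySem.Int.ofChars? ['6']).getD 0 = 6 from by decide]
    rw [if_pos (show (0:Int) ≤ 6 + -1 ∧ (6:Int) + -1 ≤ 9 from by norm_num),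
        if_pos (show (0:Int) ≤ 6 + 1 ∧ (6:Int) + 1 ≤ 9 from by norm_num),
        branch_eq' s hne hhead k hk acc (6 + -1) '5' (by decide) (by decide),
        branch_eq' s hne hhead k hk _ (6 + 1) '7' (by decide) (by decide)]
    norm_num
    omega
  · simp only [List.foldl_cons, List.foldl_nil, hget, hc,
      show (PySem.Int.ofChars? ['7']).getD 0 = 7 from by decide]
    rw [if_pos (show (0:Int) ≤ 7 + -1 ∧ (7:Int) + -1 ≤ 9 from by norm_num),
        if_pos (show (0:Int) ≤ 7 + 1 ∧ (7:Int) + 1 ≤ 9 from by norm_num),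
        branch_eq' s hne hhead k hk acc (7 + -1) '6' (by decide) (by decide),
        branch_eq' s hne hhead k hk _ (7 + 1) '8' (by decide) (by decide)]
    norm_num
    omega
  · simp only [List.foldl_cons, List.foldl_nil, hget, hc,
      show (PySem.Int.ofChars? ['8']).getD 0 = 8 from by decide]
    rw [if_pos (show (0:Int) ≤ 8 + -1 ∧ (8:Int) + -1 ≤ 9 from by norm_num),
        if_pos (show (0:Int) ≤ 8 + 1 ∧ (8:Int) + 1 ≤ 9 from by norm_num),
        branch_eq' s hne hhead k hk acc (8 + -1) '7' (by decide) (by decide),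
        branch_eq' s hne hhead k hk _ (8 + 1) '9' (by decide) (by decide)]
    norm_num
    omega
  · simp only [List.foldl_cons, List.foldl_nil, hget, hc,
      show (PySem.Int.ofChars? ['9']).getD 0 = 9 from by decide]
    rw [if_pos (show (0:Int) ≤ 9 + -1 ∧ (9:Int) + -1 ≤ 9 from by norm_num),
        if_neg (show ¬((0:Int) ≤ 9 + 1 ∧ (9:Int) + 1 ≤ 9) from by norm_num),
        branch_eq' s hne hhead k hk acc (9 + -1) '8' (by decide) (by decide)]
    norm_num

-- ===== VERDICT (by name: the statement is the Claim_ definition above) =====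
theorem close_num_spec : Claim_equal_close_num := by
  intro n _ hpre
  unfold Spec_close_num close_num close_num_alt
  obtain ⟨hne, hdig, hhead⟩ := toChars_facts n hpre
  exact loops_eq (PySem.Int.toChars n) hne hdig hhead
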